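-- pv_equiv track=rewrite | github.com/opentaproject/openta-public | openta/django/backend/exercises/questiontypes/core/coreutils.py | index_of_matching_left
-- ===== SOURCE A (Python) =====
-- def index_of_matching_left(result, indbegin):
--     if result[indbegin] in [')' , ']' ] :
--         r = result[indbegin]
--     else :
--         return indbegin
--     pats = {')':'(',']':'['}
--     level = 1
--     l = pats[r];
--     ind = indbegin
--     while level > 0 and ind > 0:
--         ind = ind - 1
--         if result[ind] == l :
--             level = level - 1
--         elif result[ind] == r :
--             level = level + 1
--     assert result[indbegin] == r , "RIGHT PAREN  MISSING"
--     assert result[ind] == l,  "LEFT PAREN  MISSING"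
--     return ind
-- ===== SOURCE B (Python) =====
-- def index_of_matching_left(result, indbegin):
--     r = result[indbegin]
--     pats = {')': '(', ']': '['}
--     if r not in pats:
--         return indbegin
--     l = pats[r]
--     stack = []
--     for i in range(indbegin):
--         c = result[i]
--         if c == l:
--             stack.append(i)
--         elif c == r and stack:
--             stack.pop()
--     assert stack, "LEFT PAREN  MISSING"
--     return stack.pop()
-- ===== Notes on version B (the rewrite author's own statement) =====
-- stated objective: alternative
-- what changed: A scans backwards from indbegin with a nesting-level counter; B scans the prefix forwards once maintaining a stack of unmatched open-bracket indices and returns its top.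
-- outside the precondition, e.g. on index_of_matching_left('())', 2): A returns 0, B raises AssertionError
import Mathlib
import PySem

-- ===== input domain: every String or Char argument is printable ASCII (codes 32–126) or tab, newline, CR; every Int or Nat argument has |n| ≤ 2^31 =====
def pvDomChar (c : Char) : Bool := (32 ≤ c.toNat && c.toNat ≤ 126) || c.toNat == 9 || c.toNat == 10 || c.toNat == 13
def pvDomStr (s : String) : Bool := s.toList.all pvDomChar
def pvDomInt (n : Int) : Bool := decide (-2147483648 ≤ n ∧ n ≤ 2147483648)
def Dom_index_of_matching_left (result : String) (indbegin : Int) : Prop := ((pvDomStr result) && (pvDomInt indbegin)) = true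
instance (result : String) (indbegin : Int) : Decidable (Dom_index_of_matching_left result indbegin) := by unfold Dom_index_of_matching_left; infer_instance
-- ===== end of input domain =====

-- B replaces A's backward level-counting scan by a single forward scan over the prefix keeping a
-- stack of unmatched open-bracket indices (objective: alternative; return value only).

-- ===== PORT A =====
-- A's while loop: state (level, ind); returns the final (level, ind)
def pvALoop (cs : List Char) (l r : Char) (level : Int) (ind : Int) : Int × Int :=
  if _h : 0 < level ∧ 0 < ind then
    let ind' := ind - 1
    let level' :=
      if PySem.List.pyGet? cs ind' = some l then level - 1
      else if PySem.List.pyGet? cs ind' = some r then level + 1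
      else level
    pvALoop cs l r level' ind'
  else (level, ind)
termination_by ind.toNat
decreasing_by omega

def index_of_matching_left (result : String) (indbegin : Int) : Int :=
  match PySem.Str.pyGet? result indbegin with
  | none => 0       -- result[indbegin] raises IndexError (outside Pre_)
  | some c =>
    if c = ')' ∨ c = ']' then
      let r := c
      let l := if r = ')' then '(' else '['          -- pats[r]
      let p := pvALoop result.toList l r 1 indbegin
      -- assert result[indbegin] == r holds by construction; assert result[ind] == l:
      if PySem.Str.pyGet? result p.2 = some l then p.2 else 0   -- AssertionError (outside Pre_)
    else indbegin

-- ===== PORT B =====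
-- one step of B's forward loop (stack top at the list head, as Python's list end)
def pvBStep (cs : List Char) (l r : Char) (st : List Int) (i : Int) : List Int :=
  match PySem.List.pyGet? cs i with
  | none => st      -- unreachable: i ∈ range(indbegin) is in range whenever result[indbegin] is
  | some c =>
    if c = l then i :: st
    else if c = r then (if st = [] then st else st.tail)
    else st

def index_of_matching_left_alt (result : String) (indbegin : Int) : Int :=
  match PySem.Str.pyGet? result indbegin with
  | none => 0       -- result[indbegin] raises IndexError (outside Pre_)
  | some rc =>
    if rc = ')' ∨ rc = ']' then
      let l := if rc = ')' then '(' else '['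
      let st := (PySem.List.pyRange 0 indbegin 1).foldl (pvBStep result.toList l rc) []
      match st with
      | t :: _ => t
      | [] => 0     -- assert stack fails: AssertionError (outside Pre_)
    else indbegin

-- ===== PRECONDITION & SPEC =====
-- bracket-counting balance of the segment cs[k:i): +1 per l, -1 per r (spec-side helper)
def pvDelta (l r c : Char) : Int := if c = l then 1 else if c = r then -1 else 0
def pvBal (cs : List Char) (l r : Char) (k i : Nat) : Int :=
  ((cs.take i).drop k).foldl (fun a c => a + pvDelta l r c) 0

-- Pre_ excludes inputs on which A raises (IndexError on result[indbegin], or AssertionError when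
-- the bracket at indbegin has no matching open to its left) and the inputs where, with no matching
-- open, A accidentally returns 0 because result[0] happens to equal the open-bracket character;
-- B's own assert raises on all of those.
def Pre_index_of_matching_left (result : String) (indbegin : Int) : Prop :=
  -(result.toList.length : Int) ≤ indbegin ∧ indbegin < (result.toList.length : Int) ∧
  (PySem.Str.pyGet? result indbegin = some ')' →
     0 < indbegin ∧ ∃ k < indbegin.toNat, pvBal result.toList '(' ')' k indbegin.toNat = 1) ∧
  (PySem.Str.pyGet? result indbegin = some ']' →
     0 < indbegin ∧ ∃ k < indbegin.toNat, pvBal result.toList '[' ']' k indbegin.toNat = 1)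

instance (result : String) (indbegin : Int) : Decidable (Pre_index_of_matching_left result indbegin) := by
  unfold Pre_index_of_matching_left; infer_instance

def pvWitness_index_of_matching_left : String × Int := ("(a)", 2)

def Spec_index_of_matching_left (result : String) (indbegin : Int) (out : Int) : Prop := out = index_of_matching_left_alt result indbegin
instance (result : String) (indbegin : Int) (out : Int) : Decidable (Spec_index_of_matching_left result indbegin out) := by unfold Spec_index_of_matching_left; infer_instance

-- ===== CLAIM (what is proved, stated in full; the proofs are below) =====
def Claim_equal_index_of_matching_left : Prop := ∀ (result : String) (indbegin : Int), Dom_index_of_matching_left result indbegin → Pre_index_of_matching_left result indbegin → Spec_index_of_matching_left result indbegin (index_of_matching_left result indbegin)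

-- ===== LEMMAS AND PROOFS =====

theorem pvFoldl_shift (l r : Char) (xs : List Char) (a : Int) :
    xs.foldl (fun b c => b + pvDelta l r c) a = a + xs.foldl (fun b c => b + pvDelta l r c) 0 := by
  induction xs generalizing a with
  | nil => simp
  | cons x xs ih => simp only [List.foldl_cons]; rw [ih, ih (0 + pvDelta l r x)]; ring

theorem pvBal_self (cs : List Char) (l r : Char) (i : Nat) : pvBal cs l r i i = 0 := by
  unfold pvBal
  rw [List.drop_eq_nil_of_le (by simp)]
  rfl

theorem pvBal_cons (cs : List Char) (l r : Char) (k i : Nat) (hk : k < i) (hi : i ≤ cs.length) :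
    pvBal cs l r k i = pvDelta l r (cs[k]'(by omega)) + pvBal cs l r (k+1) i := by
  unfold pvBal
  rw [List.drop_eq_getElem_cons (by simp; omega)]
  rw [List.foldl_cons, pvFoldl_shift]
  simp [List.getElem_take]

theorem pvBal_snoc (cs : List Char) (l r : Char) (k i : Nat) (hk : k ≤ i) (hi : i < cs.length) :
    pvBal cs l r k (i+1) = pvBal cs l r k i + pvDelta l r (cs[i]'hi) := by
  unfold pvBal
  rw [List.take_add_one, List.getElem?_eq_getElem hi]
  rw [List.drop_append_of_le_length (by simp; omega)]
  simp [List.foldl_append]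

theorem pvDelta_le_one (l r c : Char) : pvDelta l r c ≤ 1 := by
  unfold pvDelta; split_ifs <;> omega

theorem pvDelta_eq_one (l r c : Char) (h : 1 ≤ pvDelta l r c) : c = l := by
  unfold pvDelta at h; split_ifs at h with h1 h2 <;> first | exact h1 | omega

-- the largest k < ib whose segment balance to ib is (at least) 1: the matching open index
def pvKmax (cs : List Char) (l r : Char) (ib : Nat) : Nat :=
  Nat.findGreatest (fun k => k < ib ∧ 1 ≤ pvBal cs l r k ib) ib

theorem pvKmax_facts (cs : List Char) (l r : Char) (ib : Nat)
    (hib : ib ≤ cs.length)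
    (hex : ∃ k, k < ib ∧ pvBal cs l r k ib = 1) :
    pvKmax cs l r ib < ib ∧ pvBal cs l r (pvKmax cs l r ib) ib = 1 ∧
      (∀ h : pvKmax cs l r ib < cs.length, cs[pvKmax cs l r ib] = l) ∧
      (∀ k : Nat, pvKmax cs l r ib < k → k ≤ ib → pvBal cs l r k ib ≤ 0) := by
  obtain ⟨k0, hk0, hb0⟩ := hex
  have hP : pvKmax cs l r ib < ib ∧ 1 ≤ pvBal cs l r (pvKmax cs l r ib) ib := by
    have h0 : k0 < ib ∧ 1 ≤ pvBal cs l r k0 ib := ⟨hk0, by omega⟩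
    have := Nat.findGreatest_spec (P := fun k => k < ib ∧ 1 ≤ pvBal cs l r k ib) (n := ib)
      (by omega : k0 ≤ ib) h0
    unfold pvKmax
    simpa using this
  have hgt : ∀ k : Nat, pvKmax cs l r ib < k → k ≤ ib → pvBal cs l r k ib ≤ 0 := by
    intro k hk hkib
    rcases Nat.lt_or_ge k ib with h | h
    · have hnb : ¬(k < ib ∧ 1 ≤ pvBal cs l r k ib) :=
        Nat.findGreatest_is_greatest (P := fun k => k < ib ∧ 1 ≤ pvBal cs l r k ib) hk hkib
      omega
    · have : k = ib := by omega
      rw [this, pvBal_self]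
  have hcons := pvBal_cons cs l r (pvKmax cs l r ib) ib hP.1 hib
  have hnext : pvBal cs l r (pvKmax cs l r ib + 1) ib ≤ 0 := hgt _ (by omega) (by omega)
  have hdle := pvDelta_le_one l r (cs[pvKmax cs l r ib]'(by omega))
  refine ⟨hP.1, by omega, ?_, hgt⟩
  intro h
  exact pvDelta_eq_one l r _ (by omega)

-- A's loop, run from ind = m with the loop invariant level = 1 - bal(m, ib)
theorem pvALoop_run (cs : List Char) (l r : Char) (hlr : l ≠ r) (ib kmax : Nat)
    (hib : ib ≤ cs.length)
    (hk1 : pvBal cs l r kmax ib = 1)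
    (hgt : ∀ k : Nat, kmax < k → k ≤ ib → pvBal cs l r k ib ≤ 0) :
    ∀ m : Nat, kmax ≤ m → m ≤ ib →
      pvALoop cs l r (1 - pvBal cs l r m ib) (m : Int) = (0, (kmax : Int)) := by
  intro m
  induction m with
  | zero =>
    intro h1 h2
    have : kmax = 0 := by omega
    subst this
    rw [pvALoop]
    simp [hk1]
  | succ m ih =>
    intro h1 h2
    by_cases hk : kmax = m + 1
    · rw [pvALoop]
      subst hk
      simp [hk1]
    · have hlt : kmax ≤ m := by omega
      have hble : pvBal cs l r (m+1) ib ≤ 0 := hgt (m+1) (by omega) h2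
      have hmlen : m < cs.length := by omega
      rw [pvALoop]
      rw [dif_pos (by constructor <;> [omega; exact_mod_cast Nat.succ_pos m])]
      have hcast : ((m+1 : Nat) : Int) - 1 = (m : Int) := by push_cast; ring
      rw [hcast]
      have hget : PySem.List.pyGet? cs ((m : Nat) : Int) = some (cs[m]'hmlen) := by
        rw [PySem.List.pyGet?_natCast, List.getElem?_eq_getElem hmlen]
      have hstep := pvBal_cons cs l r m ib (by omega) hib
      have hres : (if PySem.List.pyGet? cs ((m : Nat) : Int) = some l then (1 - pvBal cs l r (m+1) ib) - 1
          else if PySem.List.pyGet? cs ((m : Nat) : Int) = some r then (1 - pvBal cs l r (m+1) ib) + 1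
          else (1 - pvBal cs l r (m+1) ib)) = 1 - pvBal cs l r m ib := by
        rw [hget]
        by_cases hc : cs[m]'hmlen = l
        · simp [pvDelta, hc] at hstep
          simp [hc]
          omega
        · by_cases hc2 : cs[m]'hmlen = r
          · simp [pvDelta, hc2, Ne.symm hlr] at hstep
            simp [hc2, Ne.symm hlr]
            omega
          · simp [pvDelta, hc, hc2] at hstep
            simp [hc, hc2]
            omega
      show pvALoop cs l r (if PySem.List.pyGet? cs ((m : Nat) : Int) = some l then (1 - pvBal cs l r (m+1) ib) - 1
          else if PySem.List.pyGet? cs ((m : Nat) : Int) = some r then (1 - pvBal cs l r (m+1) ib) + 1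
          else (1 - pvBal cs l r (m+1) ib)) ((m : Nat) : Int) = (0, (kmax : Int))
      rw [hres]
      exact ih hlt (by omega)

-- B's loop invariant: the stack holds exactly the unmatched opens, top first
def pvINV (cs : List Char) (l r : Char) (i : Nat) (s : List Int) : Prop :=
  List.Pairwise (fun a b => b < a) s ∧
  (∀ j ∈ s, 0 ≤ j ∧ j < (i:Int) ∧ PySem.List.pyGet? cs j = some l) ∧
  (∀ k : Nat, k ≤ i → pvBal cs l r k i ≤ (s.countP (fun j => decide ((k:Int) ≤ j)) : Int)) ∧
  (∀ j ∈ s, pvBal cs l r j.toNat i = (s.countP (fun j' => decide (j ≤ j')) : Int))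

theorem pvCountP_eq_zero_of_lt (s : List Int) (t : Int) (h : ∀ j ∈ s, j < t) :
    s.countP (fun j => decide (t ≤ j)) = 0 := by
  rw [List.countP_eq_zero]
  intro j hj
  simpa using not_le.mpr (h j hj)

theorem pvINV_step (cs : List Char) (l r : Char) (hlr : l ≠ r) (i : Nat) (hilen : i < cs.length)
    (s : List Int) (h : pvINV cs l r i s) : pvINV cs l r (i+1) (pvBStep cs l r s ((i : Nat) : Int)) := by
  obtain ⟨hpw, hmem, hle, heq⟩ := h
  have hget : PySem.List.pyGet? cs ((i : Nat) : Int) = some (cs[i]'hilen) := by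
    rw [PySem.List.pyGet?_natCast, List.getElem?_eq_getElem hilen]
  have hsnoc : ∀ k : Nat, k ≤ i → pvBal cs l r k (i+1) = pvBal cs l r k i + pvDelta l r (cs[i]'hilen) :=
    fun k hk => pvBal_snoc cs l r k i hk hilen
  have hself : pvBal cs l r (i+1) (i+1) = 0 := pvBal_self cs l r (i+1)
  by_cases hc : cs[i]'hilen = l
  -- push
  · have hstep : pvBStep cs l r s ((i:Nat) : Int) = ((i:Nat) : Int) :: s := by
      rw [pvBStep, hget]; simp [hc]
    rw [hstep]
    have hdelta : pvDelta l r (cs[i]'hilen) = 1 := by simp [pvDelta, hc]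
    refine ⟨?_, ?_, ?_, ?_⟩
    · exact List.Pairwise.cons (fun j hj => (hmem j hj).2.1) hpw
    · intro j hj
      rcases List.mem_cons.mp hj with h | h
      · subst h
        exact ⟨by positivity, by push_cast; omega, by rw [hget, hc]⟩
      · obtain ⟨ha, hb, hcg⟩ := hmem j h
        exact ⟨ha, by push_cast; omega, hcg⟩
    · intro k hk
      by_cases hki : k ≤ i
      · have := hle k hki
        rw [hsnoc k hki, hdelta, List.countP_cons]
        have hd : decide ((k:Int) ≤ (i:Int)) = true := by simp; exact_mod_cast hki
        simp only [hd]
        push_cast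
        omega
      · have hk1 : k = i + 1 := by omega
        subst hk1
        rw [hself]
        positivity
    · intro j hj
      rcases List.mem_cons.mp hj with h | h
      · subst h
        have hbal : pvBal cs l r ((i:Int).toNat) (i+1) = 1 := by
          rw [Int.toNat_natCast, hsnoc i (le_refl i), hdelta, pvBal_self]
          ring
        rw [hbal, List.countP_cons]
        have h0 : s.countP (fun j' => decide (((i:Nat):Int) ≤ j')) = 0 :=
          pvCountP_eq_zero_of_lt s ((i:Nat):Int) (fun j hj => (hmem j hj).2.1)
        simp [h0]
      · obtain ⟨ha, hb, _⟩ := hmem j h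
        have hj1 : j.toNat ≤ i := by omega
        rw [hsnoc j.toNat hj1, hdelta, heq j h, List.countP_cons]
        have hd : decide (j ≤ ((i:Nat):Int)) = true := by simp; omega
        simp only [hd]
        push_cast
        ring
  · by_cases hc2 : cs[i]'hilen = r
    -- pop
    · have hdelta : pvDelta l r (cs[i]'hilen) = -1 := by simp [pvDelta, hc2, Ne.symm hlr]
      have hstep : pvBStep cs l r s ((i:Nat) : Int) = (if s = [] then s else s.tail) := by
        rw [pvBStep, hget]; simp [hc2, Ne.symm hlr]
      rw [hstep]
      cases s with
      | nil =>
        refine ⟨List.Pairwise.nil, by simp, ?_, by simp⟩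
        intro k hk
        by_cases hki : k ≤ i
        · have := hle k hki
          rw [hsnoc k hki, hdelta]
          simp at this ⊢
          omega
        · have hk1 : k = i + 1 := by omega
          subst hk1
          rw [hself]
          simp
      | cons t rest =>
        have hpwc := List.pairwise_cons.mp hpw
        have htail : (if (t :: rest : List Int) = [] then (t :: rest) else (t :: rest).tail) = rest := by
          simp
        rw [htail]
        refine ⟨hpwc.2, ?_, ?_, ?_⟩
        · intro j hj
          obtain ⟨ha, hb, hcg⟩ := hmem j (List.mem_cons_of_mem t hj)
          exact ⟨ha, by push_cast; omega, hcg⟩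
        · intro k hk
          by_cases hki : k ≤ i
          · have hlek := hle k hki
            rw [hsnoc k hki, hdelta]
            by_cases hkt : (k:Int) ≤ t
            · rw [List.countP_cons] at hlek
              have hd : decide ((k:Int) ≤ t) = true := by simpa using hkt
              simp only [hd] at hlek
              push_cast at hlek ⊢
              omega
            · have h0 : rest.countP (fun j => decide ((k:Int) ≤ j)) = 0 :=
                pvCountP_eq_zero_of_lt rest _ (fun j hj => by have := hpwc.1 j hj; omega)
              have h0' : (t :: rest).countP (fun j => decide ((k:Int) ≤ j)) = 0 := by
                rw [List.countP_cons, h0]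
                simp
                omega
              rw [h0'] at hlek
              rw [h0]
              simp at hlek ⊢
              omega
          · have hk1 : k = i + 1 := by omega
            subst hk1
            rw [hself]
            positivity
        · intro j hj
          have hjt : j < t := hpwc.1 j hj
          obtain ⟨ha, hb, _⟩ := hmem j (List.mem_cons_of_mem t hj)
          have hj1 : j.toNat ≤ i := by omega
          rw [hsnoc j.toNat hj1, hdelta, heq j (List.mem_cons_of_mem t hj), List.countP_cons]
          have hd : decide (j ≤ t) = true := by simp; omega
          simp only [hd]
          push_cast
          ring
    -- some other character: stack unchanged
    · have hdelta : pvDelta l r (cs[i]'hilen) = 0 := by simp [pvDelta, hc, hc2]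
      have hstep : pvBStep cs l r s ((i:Nat) : Int) = s := by
        rw [pvBStep, hget]; simp [hc, hc2]
      rw [hstep]
      refine ⟨hpw, ?_, ?_, ?_⟩
      · intro j hj
        obtain ⟨ha, hb, hcg⟩ := hmem j hj
        exact ⟨ha, by push_cast; omega, hcg⟩
      · intro k hk
        by_cases hki : k ≤ i
        · rw [hsnoc k hki, hdelta]
          have := hle k hki
          omega
        · have hk1 : k = i + 1 := by omega
          subst hk1
          rw [hself]
          positivity
      · intro j hj
        obtain ⟨ha, hb, _⟩ := hmem j hj
        have hj1 : j.toNat ≤ i := by omega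
        rw [hsnoc j.toNat hj1, hdelta, heq j hj]
        ring

theorem pvBInv (cs : List Char) (l r : Char) (hlr : l ≠ r) (ib : Nat) (hib : ib ≤ cs.length) :
    ∀ i : Nat, i ≤ ib →
      pvINV cs l r i ((PySem.List.pyRange 0 (i : Int) 1).foldl (pvBStep cs l r) []) := by
  intro i
  induction i with
  | zero =>
    intro _
    rw [PySem.List.pyRange_one_eq_nil (by norm_num)]
    refine ⟨List.Pairwise.nil, by simp, ?_, by simp⟩
    intro k hk
    interval_cases k
    simp [pvBal_self]
  | succ i ih =>
    intro h2
    have hsplit : PySem.List.pyRange 0 ((i+1 : Nat) : Int) 1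
        = PySem.List.pyRange 0 (i : Int) 1 ++ [(i : Int)] := by
      have hci : ((i+1 : Nat) : Int) = (i : Int) + 1 := by push_cast; ring
      rw [hci, PySem.List.pyRange_one_succ_right (by positivity)]
    rw [hsplit, List.foldl_append]
    simp only [List.foldl_cons, List.foldl_nil]
    exact pvINV_step cs l r hlr i (by omega) _ (ih (by omega))

theorem pvB_head (cs : List Char) (l r : Char) (hlr : l ≠ r) (ib : Nat) (hib : ib ≤ cs.length)
    (hex : ∃ k, k < ib ∧ pvBal cs l r k ib = 1) :
    ∃ rest, (PySem.List.pyRange 0 (ib : Int) 1).foldl (pvBStep cs l r) []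
      = ((pvKmax cs l r ib : Nat) : Int) :: rest := by
  obtain ⟨hklt, hk1, _, hgt⟩ := pvKmax_facts cs l r ib hib hex
  obtain ⟨hpw, hmem, hle, heq⟩ := pvBInv cs l r hlr ib hib ib (le_refl ib)
  set s := (PySem.List.pyRange 0 (ib : Int) 1).foldl (pvBStep cs l r) [] with hs
  obtain ⟨k0, hk0, hb0⟩ := hex
  cases hsc : s with
  | nil =>
    exfalso
    have := hle k0 (by omega)
    rw [hsc] at this
    simp at this
    omega
  | cons t rest =>
    have hpwc := List.pairwise_cons.mp (hsc ▸ hpw)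
    have htmem : t ∈ s := by rw [hsc]; exact List.mem_cons_self
    obtain ⟨ht0, htlt, _⟩ := hmem t htmem
    have hbal_t : pvBal cs l r t.toNat ib = 1 := by
      rw [heq t htmem, hsc, List.countP_cons]
      have h0 : rest.countP (fun j' => decide (t ≤ j')) = 0 :=
        pvCountP_eq_zero_of_lt rest t hpwc.1
      simp [h0]
    have h1 : t.toNat ≤ pvKmax cs l r ib := by
      unfold pvKmax
      exact Nat.le_findGreatest (by omega) ⟨by omega, by omega⟩
    have h2 : pvKmax cs l r ib ≤ t.toNat := by
      by_contra hcon
      have hkc : t < ((pvKmax cs l r ib : Nat) : Int) := by omega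
      have := hle (pvKmax cs l r ib) (by omega)
      rw [hsc] at this
      have h0 : (t :: rest).countP (fun j => decide (((pvKmax cs l r ib : Nat):Int) ≤ j)) = 0 :=
        pvCountP_eq_zero_of_lt _ _ (by
          intro j hj
          rcases List.mem_cons.mp hj with h | h
          · omega
          · have := hpwc.1 j h; omega)
      rw [h0] at this
      omega
    have : ((pvKmax cs l r ib : Nat) : Int) = t := by omega
    exact ⟨rest, by rw [this]⟩

-- the common bracket case: A's backward scan and B's stack both yield pvKmax
theorem pvBracket (result : String) (indbegin : Int) (l r : Char) (hlr : l ≠ r)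
    (hpos : 0 < indbegin) (hhi : indbegin < (result.toList.length : Int))
    (hex : ∃ k, k < indbegin.toNat ∧ pvBal result.toList l r k indbegin.toNat = 1) :
    (if PySem.Str.pyGet? result (pvALoop result.toList l r 1 indbegin).2 = some l
       then (pvALoop result.toList l r 1 indbegin).2 else 0)
    = (match (PySem.List.pyRange 0 indbegin 1).foldl (pvBStep result.toList l r) [] with
       | t :: _ => t | [] => 0) := by
  set cs := result.toList with hcs
  set ib := indbegin.toNat with hib0
  have hI : indbegin = (ib : Int) := by omega
  have hib : ib ≤ cs.length := by omega
  obtain ⟨hklt, hk1, hchar, hgt⟩ := pvKmax_facts cs l r ib hib hex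
  have hA : pvALoop cs l r 1 (ib : Int) = (0, ((pvKmax cs l r ib : Nat) : Int)) := by
    have := pvALoop_run cs l r hlr ib (pvKmax cs l r ib) hib hk1 hgt ib (by omega) (le_refl ib)
    rw [pvBal_self] at this
    simpa using this
  obtain ⟨rest, hB⟩ := pvB_head cs l r hlr ib hib hex
  rw [hI, hA, hB]
  have hkl : pvKmax cs l r ib < cs.length := by omega
  have hgl : result.toList[pvKmax cs l r ib]? = some l := by
    rw [List.getElem?_eq_getElem (by rw [← hcs]; exact hkl)]
    exact congrArg some (hchar hkl)
  simp [PySem.Str.pyGet?, hgl]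

-- ===== VERDICT (by name: the statement is the Claim_ definition above) =====
theorem index_of_matching_left_spec : Claim_equal_index_of_matching_left := by
  intro result indbegin _dom hpre
  obtain ⟨hlo, hhi, hP1, hP2⟩ := hpre
  unfold Spec_index_of_matching_left index_of_matching_left index_of_matching_left_alt
  have hsg : PySem.Str.pyGet? result indbegin = PySem.List.pyGet? result.toList indbegin := by
    simp [PySem.Str.pyGet?]
  cases hO : PySem.List.pyGet? result.toList indbegin with
  | none =>
    exfalso
    rw [PySem.List.pyGet?_eq_none_iff] at hO
    apply hO
    have hlen : (result.toList.length : Int) = (result.length : Int) := by simp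
    simp [PySem.Raise.InRange]
    omega
  | some c =>
    simp only [hsg, hO]
    by_cases hbr : c = ')' ∨ c = ']'
    · rw [if_pos hbr, if_pos hbr]
      rcases hbr with hc | hc
      · subst hc
        obtain ⟨hpos, k, hk, hbal⟩ := hP1 (by rw [hsg, hO])
        have := pvBracket result indbegin '(' ')' (by decide) hpos hhi ⟨k, hk, hbal⟩
        simpa using this
      · subst hc
        obtain ⟨hpos, k, hk, hbal⟩ := hP2 (by rw [hsg, hO])
        have := pvBracket result indbegin '[' ']' (by decide) hpos hhi ⟨k, hk, hbal⟩
        simpa using this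
    · rw [if_neg hbr, if_neg hbr]
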